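-- pv_equiv track=rewrite | github.com/Planet-AI-GmbH/tfaip | test/data/test_manual_batching.py | groups_into_samples
-- ===== SOURCE A (Python) =====
-- from typing import Iterable, Dict, Type, List, Union, Any
--
-- def groups_into_samples(inputs: List[Any]) -> List[List[Any]]:
--     # create batches
--     # from [0, 1, 2, 3, 4, 5, ...] create
--     # [[0], [1, 2], [3, 4, 5], [6, 7, 8, 9], ...]
--     inputs = inputs[:]
--     batches = []
--     target_size = 1
--     while inputs:
--         n = inputs.pop()
--         sample = n
--         if len(batches) == 0:
--             batches.append([sample])
--             target_size += 1
--         else: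
--             if len(batches[-1]) < target_size:
--                 batches[-1].append(sample)
--             else:
--                 batches.append([sample])
--                 target_size += 1
--
--     return batches
-- ===== SOURCE B (Python) =====
-- def groups_into_samples(inputs):
--     # slice-based chunking of the reversed list: batch sizes 2, 3, 4, ...
--     rev = inputs[::-1]
--     batches = []
--     size = 2
--     while rev:
--         batches.append(rev[:size])
--         rev = rev[size:]
--         size += 1
--     return batches
-- ===== Notes on version B (the rewrite author's own statement) =====
-- stated objective: simpler
-- what changed: Replaces the per-element pop/append loop that mutates the last batch under a target_size counter with direct slice-based chunking of the reversed list into chunks of sizes 2, 3, 4, ...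
import Mathlib
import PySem

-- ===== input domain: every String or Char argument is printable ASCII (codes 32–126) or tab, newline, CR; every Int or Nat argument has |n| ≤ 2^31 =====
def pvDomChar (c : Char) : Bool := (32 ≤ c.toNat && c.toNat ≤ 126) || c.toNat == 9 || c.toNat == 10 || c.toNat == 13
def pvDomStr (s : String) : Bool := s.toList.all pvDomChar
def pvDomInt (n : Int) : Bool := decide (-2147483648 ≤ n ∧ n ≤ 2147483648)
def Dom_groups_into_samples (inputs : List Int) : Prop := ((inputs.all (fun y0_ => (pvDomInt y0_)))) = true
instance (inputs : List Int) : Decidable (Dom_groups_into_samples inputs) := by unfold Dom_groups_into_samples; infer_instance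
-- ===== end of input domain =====

-- B replaces A's per-element pop/append loop (mutating the last batch under a
-- target_size counter) with slice-based chunking of the reversed list: simpler, same cost.

-- ===== PORT A =====
-- A's while loop pops the LAST element of `inputs` each iteration, i.e. it
-- consumes the elements of `inputs.reverse` head-first; the loop is ported
-- structurally over that reversed list (exact: inputs.pop() yields exactly the
-- elements of inputs.reverse in order). batches[-1] access/append is
-- getLast! / dropLast ++ [getLast! ++ [n]], exact since that branch runs only
-- when batches is nonempty.
def groupsLoopA : List Int → List (List Int) → Int → List (List Int)
  | [], batches, _ => batches
  | n :: rest, batches, target_size =>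
    if batches.isEmpty then
      groupsLoopA rest [[n]] (target_size + 1)
    else if ((batches.getLast!).length : Int) < target_size then
      groupsLoopA rest (batches.dropLast ++ [batches.getLast! ++ [n]]) target_size
    else
      groupsLoopA rest (batches ++ [[n]]) (target_size + 1)

def groups_into_samples (inputs : List Int) : List (List Int) :=
  groupsLoopA inputs.reverse [] 1

-- ===== PORT B =====
-- while rev: batches.append(rev[:size]); rev = rev[size:]; size += 1
-- The fuel argument (rev.length at the call) only makes the recursion total in
-- Lean; with size ≥ 2 each step strictly shortens rev, so it is never exhausted.
def groupsLoopB : Nat → List Int → Int → List (List Int)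
  | 0, _, _ => []
  | _ + 1, [], _ => []
  | fuel + 1, x :: rev', size =>
    PySem.List.slice (x :: rev') none (some size) ::
      groupsLoopB fuel (PySem.List.slice (x :: rev') (some size) none) (size + 1)

def groups_into_samples_alt (inputs : List Int) : List (List Int) :=
  groupsLoopB inputs.length inputs.reverse 2

-- ===== PRECONDITION & SPEC =====
def Spec_groups_into_samples (inputs : List Int) (out : List (List Int)) : Prop := out = groups_into_samples_alt inputs
instance (inputs : List Int) (out : List (List Int)) : Decidable (Spec_groups_into_samples inputs out) := by unfold Spec_groups_into_samples; infer_instance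

-- ===== CLAIM (what is proved, stated in full; the proofs are below) =====
def Claim_equal_groups_into_samples : Prop := ∀ (inputs : List Int), Dom_groups_into_samples inputs → Spec_groups_into_samples inputs (groups_into_samples inputs)

-- ===== LEMMAS AND PROOFS =====

-- One-step unfolding of A's loop (definitional).
lemma groupsLoopA_cons (n : Int) (rest : List Int) (batches : List (List Int)) (target_size : Int) :
    groupsLoopA (n :: rest) batches target_size =
      if batches.isEmpty then groupsLoopA rest [[n]] (target_size + 1)
      else if ((batches.getLast!).length : Int) < target_size then
        groupsLoopA rest (batches.dropLast ++ [batches.getLast! ++ [n]]) target_size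
      else groupsLoopA rest (batches ++ [[n]]) (target_size + 1) := rfl

-- Proof-only characterization of B's loop: chunk sizes k+2, k+3, ...
def chunkB (rev : List Int) (k : Nat) : List (List Int) :=
  if h : rev = [] then []
  else rev.take (k + 2) :: chunkB (rev.drop (k + 2)) (k + 1)
termination_by rev.length
decreasing_by
  cases rev with
  | nil => exact absurd rfl h
  | cons a l => simp only [List.length_drop, List.length_cons]; omega

lemma groupsLoopB_eq_chunkB : ∀ (f : Nat) (rev : List Int) (k : Nat),
    rev.length ≤ f → groupsLoopB f rev ((k : Int) + 2) = chunkB rev k := by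
  intro f
  induction f with
  | zero =>
    intro rev k h
    have hnil : rev = [] := List.eq_nil_of_length_eq_zero (by omega)
    subst hnil
    rw [chunkB]
    rfl
  | succ f ih =>
    intro rev k h
    cases rev with
    | nil => rw [chunkB]; rfl
    | cons x rev' =>
      have h2 : ((k : Int) + 2) = ((k + 2 : Nat) : Int) := by push_cast; ring
      rw [chunkB, dif_neg (by simp)]
      simp only [groupsLoopB]
      rw [h2, PySem.List.slice_to_natCast, PySem.List.slice_from_natCast]
      congr 1
      have h3 : ((k + 2 : Nat) : Int) + 1 = ((k + 1 : Nat) : Int) + 2 := by push_cast; ring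
      rw [h3, ih]
      have hlen : (x :: rev').length = rev'.length + 1 := by simp
      simp only [List.length_drop, hlen]
      simp only [hlen] at h
      omega

-- Loop invariant for A: with a nonempty current last batch `cur` that still has
-- capacity (cur.length ≤ t), A fills it from `rest` to length t and then chunks
-- the remainder with sizes t+1, t+2, ...
lemma groupsLoopA_invariant : ∀ (rest : List Int) (bs : List (List Int)) (cur : List Int) (t : Nat),
    cur ≠ [] → cur.length ≤ t →
    groupsLoopA rest (bs ++ [cur]) (t : Int) =
      bs ++ (cur ++ rest.take (t - cur.length)) :: chunkB (rest.drop (t - cur.length)) (t - 1) := by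
  intro rest
  induction rest with
  | nil =>
    intro bs cur t hne hle
    simp [groupsLoopA, chunkB]
  | cons n rs ih =>
    intro bs cur t hne hle
    have hlast : (bs ++ [cur]).getLast! = cur := by
      rw [List.getLast!_eq_getLast?_getD, List.getLast?_concat]; rfl
    have hdrop : (bs ++ [cur]).dropLast = bs := by simp
    rw [groupsLoopA_cons, hlast, hdrop, if_neg (by simp)]
    by_cases hlt : cur.length < t
    · -- current batch still has room: append n to it
      rw [if_pos (by exact_mod_cast hlt)]
      rw [ih bs (cur ++ [n]) t (by simp) (by simp; omega)]
      have hk : t - cur.length = (t - (cur ++ [n]).length) + 1 := by simp; omega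
      rw [hk]
      simp [List.take_succ_cons, List.drop_succ_cons, List.append_assoc]
    · -- current batch full (cur.length = t): start a new batch [n], target t+1
      have heq : cur.length = t := by omega
      rw [if_neg (by exact_mod_cast hlt)]
      have hcast : (t : Int) + 1 = ((t + 1 : Nat) : Int) := by push_cast; ring
      rw [hcast, ih (bs ++ [cur]) [n] (t + 1) (by simp) (by simp)]
      have h1 : t + 1 - [n].length = t := by simp
      rw [h1]
      have ht1 : 1 ≤ t := by
        have : 1 ≤ cur.length := List.length_pos_iff.mpr hne
        omega
      have h2 : t - cur.length = 0 := by omega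
      rw [h2]
      simp only [List.take_zero, List.append_nil, List.drop_zero, List.append_assoc,
        List.cons_append, List.nil_append]
      congr 1
      have hrhs : chunkB (n :: rs) (t - 1) =
          (n :: rs).take (t - 1 + 2) :: chunkB ((n :: rs).drop (t - 1 + 2)) (t - 1 + 1) := by
        conv_lhs => rw [chunkB]
        rw [dif_neg (by simp)]
      rw [hrhs]
      have h3 : t - 1 + 2 = t + 1 := by omega
      have h4 : t - 1 + 1 = t := by omega
      rw [h3, h4]
      simp [List.take_succ_cons, List.drop_succ_cons]

-- ===== VERDICT (by name: the statement is the Claim_ definition above) =====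
theorem groups_into_samples_spec : Claim_equal_groups_into_samples := by
  intro inputs _
  unfold Spec_groups_into_samples groups_into_samples groups_into_samples_alt
  rw [← List.length_reverse]
  cases hrev : inputs.reverse with
  | nil => rfl
  | cons h rs =>
    -- first iteration of A: batches empty, batch [h] created, target becomes 2
    have step1 : groupsLoopA (h :: rs) [] 1 = groupsLoopA rs [[h]] 2 := by
      simp [groupsLoopA_cons]
    rw [step1]
    have hA : groupsLoopA rs [[h]] ((2 : Nat) : Int) =
        [] ++ ([h] ++ rs.take (2 - 1)) :: chunkB (rs.drop (2 - 1)) (2 - 1) :=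
      groupsLoopA_invariant rs [] [h] 2 (by simp) (by simp)
    norm_num at hA
    rw [hA]
    have hB : groupsLoopB (h :: rs).length (h :: rs) (((0 : Nat) : Int) + 2) = chunkB (h :: rs) 0 :=
      groupsLoopB_eq_chunkB _ _ _ (le_refl _)
    norm_num at hB
    simp only [List.length_cons]
    rw [hB]
    conv_rhs => rw [chunkB]
    rw [dif_neg (by simp)]
    simp [List.take_succ_cons, List.drop_succ_cons, List.drop_one]
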